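-- pv_equiv track=rewrite | github.com/manwar/perlweeklychallenge-club | challenge-344/sgreen/python/ch-2.py | array_formation
-- ===== SOURCE A (Python) =====
-- from collections import Counter
-- from itertools import chain, permutations
--
-- def array_formation(source: list[list[int]], target: list[int]) -> bool:
--     """Determine if the target array can be formed by concatenating the source arrays in any order.
--
--     Args:
--         source: A list of lists of integers.
--         target: A list of integers.
--
--     Returns:
--         True if the target can be formed, False otherwise.
--     """
--
--     # Check that a solution is possible
--     if Counter(chain.from_iterable(source)) != Counter(target):
--         return False
--
--     # Generate all possible arrangements of the source lists
--     for perm in permutations(source):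
--         combined = list(chain.from_iterable(perm))
--         if combined == target:
--             # It matches the target
--             return True
--
--     # No arrangement will match the target
--     return False
-- ===== SOURCE B (Python) =====
-- def array_formation(source: list[list[int]], target: list[int]) -> bool:
--     """Backtracking: peel one piece at a time off the front of the remaining target."""
--
--     def solve(rest, pieces):
--         if not pieces:
--             return not rest
--         for k, p in enumerate(pieces):
--             if rest[:len(p)] == p and solve(rest[len(p):], pieces[:k] + pieces[k + 1:]):
--                 return True
--         return False
--
--     return solve(target, source)
-- ===== Notes on version B (the rewrite author's own statement) =====
-- stated objective: faster
-- what changed: Replaces the Counter precheck plus enumeration of all n! permutations by a backtracking search that peels pieces off the front of the remaining target, pruning every arrangement whose next piece is not a prefix.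
import Mathlib
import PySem

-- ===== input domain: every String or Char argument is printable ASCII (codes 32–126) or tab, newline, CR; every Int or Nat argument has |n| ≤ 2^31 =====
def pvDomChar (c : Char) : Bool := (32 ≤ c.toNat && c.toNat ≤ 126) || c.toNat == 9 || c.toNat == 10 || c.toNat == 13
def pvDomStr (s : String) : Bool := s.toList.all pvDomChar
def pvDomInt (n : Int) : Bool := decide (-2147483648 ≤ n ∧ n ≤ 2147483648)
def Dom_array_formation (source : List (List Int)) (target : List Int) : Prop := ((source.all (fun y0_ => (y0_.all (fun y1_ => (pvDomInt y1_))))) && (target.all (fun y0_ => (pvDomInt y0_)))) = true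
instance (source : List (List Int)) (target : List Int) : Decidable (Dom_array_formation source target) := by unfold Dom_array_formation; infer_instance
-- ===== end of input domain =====

-- B replaces A's Counter precheck + enumeration of all n! permutations by a backtracking
-- search peeling pieces off the front of the remaining target (objective: faster).

-- ===== PORT A =====
-- Counter(xs) == Counter(ys): every element of either list has the same count in both.
def counterEqA (xs ys : List Int) : Bool :=
  xs.all (fun a => xs.count a == ys.count a) && ys.all (fun a => xs.count a == ys.count a)

def array_formation (source : List (List Int)) (target : List Int) : Bool :=
  if counterEqA source.flatten target = false then false
  else
    -- for perm in permutations(source): if list(chain.from_iterable(perm)) == target: return True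
    source.permutations.any (fun perm => perm.flatten == target)

-- ===== PORT B =====
-- all ways to pick one piece out of the list, paired with the remaining pieces
def picksB (ps : List (List Int)) : List (List Int × List (List Int)) :=
  match ps with
  | [] => []
  | p :: ps' => (p, ps') :: (picksB ps').map (fun q => (q.1, p :: q.2))

-- `solve(rest, pieces)` of Source B; the Nat is fuel (= initial number of pieces), a pure
-- totality guard: each recursive call removes one piece.
def solveB : Nat → List Int → List (List Int) → Bool
  | _, rest, [] => rest.isEmpty
  | 0, _, _ :: _ => false
  | n + 1, rest, p :: ps =>
      (picksB (p :: ps)).any (fun q =>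
        (rest.take q.1.length == q.1) && solveB n (rest.drop q.1.length) q.2)

def array_formation_alt (source : List (List Int)) (target : List Int) : Bool :=
  solveB source.length target source

-- ===== PRECONDITION & SPEC =====
def Spec_array_formation (source : List (List Int)) (target : List Int) (out : Bool) : Prop := out = array_formation_alt source target
instance (source : List (List Int)) (target : List Int) (out : Bool) : Decidable (Spec_array_formation source target out) := by unfold Spec_array_formation; infer_instance

-- ===== CLAIM (what is proved, stated in full; the proofs are below) =====
def Claim_equal_array_formation : Prop := ∀ (source : List (List Int)) (target : List Int), Dom_array_formation source target → Spec_array_formation source target (array_formation source target)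

-- ===== LEMMAS AND PROOFS =====

lemma picksB_mem (p : List Int) (o ps : List (List Int)) :
    (p, o) ∈ picksB ps ↔ ∃ l r, ps = l ++ p :: r ∧ o = l ++ r := by
  induction ps generalizing o with
  | nil => simp [picksB]
  | cons p₀ ps ih =>
    simp only [picksB, List.mem_cons, List.mem_map, Prod.mk.injEq]
    constructor
    · rintro (⟨hp, ho⟩ | ⟨q, hq, hp, ho⟩)
      · exact ⟨[], ps, by simp [hp.symm, ho.symm]⟩
      · obtain ⟨l, r, hps, hoq⟩ := (ih q.2).mp (by rw [← hp]; exact hq)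
        exact ⟨p₀ :: l, r, by simp [hps], by simp [← ho, hoq]⟩
    · rintro ⟨l, r, hps, ho⟩
      cases l with
      | nil =>
        simp at hps
        exact Or.inl ⟨hps.1.symm, by simp [ho, hps.2]⟩
      | cons x l =>
        simp at hps
        refine Or.inr ⟨(p, l ++ r), (ih _).mpr ⟨l, r, hps.2, rfl⟩, rfl, ?_⟩
        simp [ho, hps.1]
  
lemma counterEqA_iff (xs ys : List Int) : counterEqA xs ys = true ↔ List.Perm xs ys := by
  rw [List.perm_iff_count]
  simp only [counterEqA, Bool.and_eq_true, List.all_eq_true, beq_iff_eq]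
  constructor
  · rintro ⟨h₁, h₂⟩ a
    by_cases hx : a ∈ xs
    · exact h₁ a hx
    by_cases hy : a ∈ ys
    · exact h₂ a hy
    · simp [List.count_eq_zero_of_not_mem, hx, hy]
  · intro h
    exact ⟨fun a _ => h a, fun a _ => h a⟩

lemma solveB_iff (n : Nat) (rest : List Int) (pieces : List (List Int))
    (hn : pieces.length ≤ n) :
    solveB n rest pieces = true ↔ ∃ l, List.Perm l pieces ∧ l.flatten = rest := by
  induction n generalizing rest pieces with
  | zero =>
    cases pieces with
    | nil =>
      simp only [solveB, List.isEmpty_iff]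
      constructor
      · intro h; exact ⟨[], List.Perm.refl _, by simp [h]⟩
      · rintro ⟨l, hl, hf⟩
        rw [List.perm_nil] at hl; simp [hl] at hf; exact hf
    | cons p ps => simp at hn
  | succ n ih =>
    cases pieces with
    | nil =>
      simp only [solveB, List.isEmpty_iff]
      constructor
      · intro h; exact ⟨[], List.Perm.refl _, by simp [h]⟩
      · rintro ⟨l, hl, hf⟩
        rw [List.perm_nil] at hl; simp [hl] at hf; exact hf
    | cons p ps =>
      simp only [solveB, List.any_eq_true, Bool.and_eq_true, beq_iff_eq]
      have hn' : ps.length + 1 ≤ n + 1 := by simpa using hn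
      constructor
      · rintro ⟨⟨q, o⟩, hmem, htake, hsolve⟩
        obtain ⟨l, r, hps, ho⟩ := (picksB_mem q o (p :: ps)).mp hmem
        have hlenps := congrArg List.length hps
        simp at hlenps
        have hlen : o.length ≤ n := by simp [ho]; omega
        obtain ⟨l', hperm, hflat⟩ := (ih _ o hlen).mp hsolve
        refine ⟨q :: l', ?_, ?_⟩
        · rw [hps]
          have h1 : List.Perm (q :: l') (q :: (l ++ r)) := by rw [← ho]; exact hperm.cons q
          exact h1.trans List.perm_middle.symm
        · have hsplit : rest = q ++ List.drop q.length rest := by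
            conv_lhs => rw [← List.take_append_drop q.length rest]
            rw [htake]
          rw [List.flatten_cons, hflat, ← hsplit]
      · rintro ⟨l, hperm, hflat⟩
        cases l with
        | nil => have := hperm.length_eq; simp at this
        | cons q l' =>
          have hq : q ∈ p :: ps := hperm.mem_iff.mp (List.mem_cons_self ..)
          obtain ⟨s, t, hst⟩ := List.append_of_mem hq
          have hperm' : List.Perm l' (s ++ t) := by
            have h1 : List.Perm (q :: l') (q :: (s ++ t)) := by
              rw [hst] at hperm
              exact hperm.trans List.perm_middle
            exact h1.cons_inv
          have hlenst := congrArg List.length hst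
          simp at hlenst
          have hlen : (s ++ t).length ≤ n := by simp; omega
          have htake : List.take q.length rest = q := by
            rw [← hflat, List.flatten_cons]; simp
          have hdrop : List.drop q.length rest = l'.flatten := by
            rw [← hflat, List.flatten_cons]; simp
          exact ⟨(q, s ++ t), (picksB_mem q (s ++ t) (p :: ps)).mpr ⟨s, t, hst, rfl⟩,
            htake, (ih _ (s ++ t) hlen).mpr ⟨l', hperm', hdrop.symm ▸ rfl⟩⟩

lemma array_formation_eq_exists (source : List (List Int)) (target : List Int) :
    array_formation source target = true ↔
      ∃ l, List.Perm l source ∧ l.flatten = target := by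
  unfold array_formation
  split
  · rename_i hce
    constructor
    · intro h; simp at h
    · rintro ⟨l, hperm, hflat⟩
      have : List.Perm source.flatten target := by
        rw [← hflat]; exact (hperm.flatten).symm
      rw [(counterEqA_iff _ _).mpr this] at hce
      exact absurd hce (by simp)
  · simp only [List.any_eq_true, beq_iff_eq]
    constructor
    · rintro ⟨perm, hmem, hflat⟩
      exact ⟨perm, List.mem_permutations.mp hmem, hflat⟩
    · rintro ⟨l, hperm, hflat⟩
      exact ⟨l, List.mem_permutations.mpr hperm, hflat⟩

-- ===== VERDICT (by name: the statement is the Claim_ definition above) =====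
theorem array_formation_spec : Claim_equal_array_formation := by
  intro source target _
  unfold Spec_array_formation array_formation_alt
  rw [Bool.eq_iff_iff, array_formation_eq_exists,
      solveB_iff source.length target source (le_refl _)]
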